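-- pv_equiv track=rewrite | github.com/downscore/eam-talon | core/lib/format_util.py | get_fragment_ranges
-- ===== SOURCE A (Python) =====
-- from enum import Enum, unique
-- from typing import Tuple
--
-- @unique
-- class CharacterType(Enum):
--   """Character classes."""
--   OTHER = 1  # Includes whitespace and symbols.
--   LOWERCASE = 2
--   UPPERCASE = 3
--   DIGIT = 4
--
-- def get_fragment_ranges(token: str) -> list[Tuple[int, int]]:
--   """Get a list of ranges of individual fragments in a camel/pascal/snake-cased token."""
--   result = []
--   start_index = 0
--   last_character_type = CharacterType.OTHER
--   for index, c in enumerate(token):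
--     # Get current character type.
--     current_character_type = CharacterType.OTHER
--     if c.isnumeric():
--       current_character_type = CharacterType.DIGIT
--     elif c.isalpha() and c.isupper():
--       current_character_type = CharacterType.UPPERCASE
--     elif c.isalpha():
--       current_character_type = CharacterType.LOWERCASE
--
--     type_changed = last_character_type != current_character_type
--     if last_character_type == CharacterType.OTHER and current_character_type != CharacterType.OTHER:
--       start_index = index
--     elif type_changed and not (last_character_type == CharacterType.UPPERCASE and
--                                current_character_type == CharacterType.LOWERCASE):
--       result.append((start_index, index))
--       start_index = index
--
--     last_character_type = current_character_type
--
--   # Handle case where token ends on a fragment.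
--   if last_character_type != CharacterType.OTHER:
--     result.append((start_index, len(token)))
--
--   return result
-- ===== SOURCE B (Python) =====
-- def get_fragment_ranges(token: str) -> list:
--   """Get a list of ranges of individual fragments in a camel/pascal/snake-cased token."""
--   # 0 = other, 1 = lowercase, 2 = uppercase, 3 = digit
--   def ctype(c):
--     if c.isnumeric():
--       return 3
--     if c.isalpha():
--       return 2 if c.isupper() else 1
--     return 0
--
--   types = [ctype(c) for c in token]
--   n = len(token)
--
--   # Pass 1: maximal same-type runs, keeping only non-other ones as (type, start, end).
--   runs = []
--   i = 0
--   while i < n: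
--     j = i + 1
--     while j < n and types[j] == types[i]:
--       j += 1
--     if types[i] != 0:
--       runs.append((types[i], i, j))
--     i = j
--
--   # Pass 2: merge an uppercase run with an immediately adjacent lowercase run.
--   result = []
--   open_frag = None  # (start, end, type_of_last_run)
--   for t, s, e in runs:
--     if open_frag is not None and open_frag[2] == 2 and t == 1 and open_frag[1] == s:
--       open_frag = (open_frag[0], e, t)
--     else:
--       if open_frag is not None:
--         result.append((open_frag[0], open_frag[1]))
--       open_frag = (s, e, t)
--   if open_frag is not None:
--     result.append((open_frag[0], open_frag[1]))
--   return result
-- ===== Notes on version B (the rewrite author's own statement) =====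
-- stated objective: alternative
-- what changed: A's single per-character state machine (tracking last character type and pending start) is replaced by a two-pass decomposition: first compute maximal same-type character runs, then fold over the runs merging an uppercase run with an immediately adjacent lowercase run and flushing fragments otherwise.
import Mathlib
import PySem

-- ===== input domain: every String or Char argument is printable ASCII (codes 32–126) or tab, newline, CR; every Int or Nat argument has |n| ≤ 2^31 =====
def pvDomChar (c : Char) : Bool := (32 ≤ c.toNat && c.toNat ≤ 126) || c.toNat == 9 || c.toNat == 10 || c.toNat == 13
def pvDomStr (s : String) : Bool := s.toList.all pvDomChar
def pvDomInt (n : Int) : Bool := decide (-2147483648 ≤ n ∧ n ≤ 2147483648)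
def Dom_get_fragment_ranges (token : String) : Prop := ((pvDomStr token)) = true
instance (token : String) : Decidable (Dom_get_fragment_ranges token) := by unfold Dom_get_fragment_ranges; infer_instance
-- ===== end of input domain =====

-- B replaces A's per-character state machine by a two-pass decomposition (maximal same-type
-- runs, then a merge/flush fold over the runs); objective: alternative decomposition, same cost.

-- ===== PORT A =====

inductive CT
  | other
  | lower
  | upper
  | digit
deriving DecidableEq, Repr

-- c.isnumeric() / c.isalpha() / c.isupper(), exact on the printable-ASCII (+ tab/newline/CR) domain
def classifyA (c : Char) : CT :=
  if '0' ≤ c ∧ c ≤ '9' then CT.digit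
  else if ('a' ≤ c ∧ c ≤ 'z' ∨ 'A' ≤ c ∧ c ≤ 'Z') ∧ ('A' ≤ c ∧ c ≤ 'Z') then CT.upper
  else if 'a' ≤ c ∧ c ≤ 'z' ∨ 'A' ≤ c ∧ c ≤ 'Z' then CT.lower
  else CT.other

def stepA (st : List (Int × Int) × Int × CT) (p : Int × Char) : List (Int × Int) × Int × CT :=
  let cur := classifyA p.2
  if st.2.2 = CT.other ∧ cur ≠ CT.other then (st.1, p.1, cur)
  else if st.2.2 ≠ cur ∧ ¬(st.2.2 = CT.upper ∧ cur = CT.lower) then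
    (st.1 ++ [(st.2.1, p.1)], p.1, cur)
  else (st.1, st.2.1, cur)

def get_fragment_ranges (token : String) : List (Int × Int) :=
  let st := (PySem.List.enumerate token.toList 0).foldl stepA ([], 0, CT.other)
  if st.2.2 ≠ CT.other then st.1 ++ [(st.2.1, (token.toList.length : Int))] else st.1

-- ===== PORT B =====

-- same Python predicates, B's order: digit, else alpha (upper / lower), else other
def ctypeB (c : Char) : Int :=
  if '0' ≤ c ∧ c ≤ '9' then 3
  else if 'a' ≤ c ∧ c ≤ 'z' ∨ 'A' ≤ c ∧ c ≤ 'Z' then (if 'A' ≤ c ∧ c ≤ 'Z' then 2 else 1)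
  else 0

-- pass 1 of Source B: maximal same-type runs (the inner `while` is the leading takeWhile count)
def runsOf : List Int → Int → List (Int × Int × Int)
  | [], _ => []
  | t :: rest, i =>
    let k := (rest.takeWhile (fun x => x == t)).length
    let j := i + 1 + (k : Int)
    let tail := runsOf (rest.drop k) j
    if t ≠ 0 then (t, i, j) :: tail else tail
  termination_by ts _ => ts.length
  decreasing_by simp [List.length_drop]

-- pass 2 of Source B: merge an uppercase run with an immediately adjacent lowercase run, else flush
def stepB (st : List (Int × Int) × Option (Int × Int × Int)) (r : Int × Int × Int) :
    List (Int × Int) × Option (Int × Int × Int) :=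
  match st.2 with
  | some (s0, e0, t0) =>
    if t0 = 2 ∧ r.1 = 1 ∧ e0 = r.2.1 then (st.1, some (s0, r.2.2, r.1))
    else (st.1 ++ [(s0, e0)], some (r.2.1, r.2.2, r.1))
  | none => (st.1, some (r.2.1, r.2.2, r.1))

def get_fragment_ranges_alt (token : String) : List (Int × Int) :=
  let st := (runsOf (token.toList.map ctypeB) 0).foldl stepB ([], none)
  match st.2 with
  | some (s0, e0, _) => st.1 ++ [(s0, e0)]
  | none => st.1

-- ===== PRECONDITION & SPEC =====
def Spec_get_fragment_ranges (token : String) (out : List (Int × Int)) : Prop := out = get_fragment_ranges_alt token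
instance (token : String) (out : List (Int × Int)) : Decidable (Spec_get_fragment_ranges token out) := by unfold Spec_get_fragment_ranges; infer_instance

-- ===== CLAIM (what is proved, stated in full; the proofs are below) =====
def Claim_equal_get_fragment_ranges : Prop := ∀ (token : String), Dom_get_fragment_ranges token → Spec_get_fragment_ranges token (get_fragment_ranges token)

-- ===== LEMMAS AND PROOFS =====

def foldA (cs : List Char) (i : Int) (st : List (Int × Int) × Int × CT) :
    List (Int × Int) × Int × CT :=
  (PySem.List.enumerate cs i).foldl stepA st

def finishA (n : Int) (st : List (Int × Int) × Int × CT) : List (Int × Int) :=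
  if st.2.2 ≠ CT.other then st.1 ++ [(st.2.1, n)] else st.1

def finishB (st : List (Int × Int) × Option (Int × Int × Int)) : List (Int × Int) :=
  match st.2 with
  | some (s0, e0, _) => st.1 ++ [(s0, e0)]
  | none => st.1

def ctInt : CT → Int
  | CT.other => 0
  | CT.lower => 1
  | CT.upper => 2
  | CT.digit => 3

def flushO : Option (Int × Int × Int) → List (Int × Int)
  | some (s0, e0, _) => [(s0, e0)]
  | none => []

theorem ctypeB_eq (c : Char) : ctypeB c = ctInt (classifyA c) := by
  unfold ctypeB classifyA
  split_ifs <;> simp_all [ctInt]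

theorem finishB_eq (st : List (Int × Int) × Option (Int × Int × Int)) :
    finishB st = st.1 ++ flushO st.2 := by
  obtain ⟨r, o⟩ := st
  cases o with
  | none => simp [finishB, flushO]
  | some v => obtain ⟨s0, e0, t0⟩ := v; simp [finishB, flushO]

theorem foldA_nil (i : Int) (st : List (Int × Int) × Int × CT) : foldA [] i st = st := rfl

theorem foldA_cons (c : Char) (cs : List Char) (i : Int) (st : List (Int × Int) × Int × CT) :
    foldA (c :: cs) i st = foldA cs (i + 1) (stepA st (i, c)) := by
  simp [foldA, PySem.List.enumerate_cons]

theorem foldA_append (xs ys : List Char) (i : Int) (st : List (Int × Int) × Int × CT) :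
    foldA (xs ++ ys) i st = foldA ys (i + xs.length) (foldA xs i st) := by
  induction xs generalizing i st with
  | nil => simp [foldA_nil]
  | cons c xs ih =>
    rw [List.cons_append, foldA_cons, ih, foldA_cons]
    congr 1
    simp only [List.length_cons]
    push_cast
    ring

-- folding A over a block of characters that all have the current type leaves the state unchanged
theorem foldA_skip (cs : List Char) (i : Int) (res : List (Int × Int)) (s : Int) (t : CT)
    (h : ∀ c ∈ cs, classifyA c = t) : foldA cs i (res, s, t) = (res, s, t) := by
  induction cs generalizing i with
  | nil => rfl
  | cons c cs ih =>
    rw [foldA_cons]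
    have hc : classifyA c = t := h c (by simp)
    have hstep : stepA (res, s, t) (i, c) = (res, s, t) := by
      simp only [stepA, hc]
      split_ifs with h1 h2 <;> simp_all
    rw [hstep]
    exact ih (i + 1) (fun c hc => h c (by simp [hc]))

theorem ctInt_eq_iff (s t : CT) : ctInt s = ctInt t ↔ s = t := by
  cases s <;> cases t <;> simp [ctInt]

theorem ctypeB_pred (c : Char) :
    ((fun x : Int => x == ctypeB c) ∘ ctypeB) = fun x => classifyA x == classifyA c := by
  funext x
  cases hx : classifyA x <;> cases hc : classifyA c <;>
    simp [Function.comp, ctypeB_eq, hx, hc, ctInt]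

theorem drop_len_takeWhile (p : Char → Bool) (l : List Char) :
    l.drop (l.takeWhile p).length = l.dropWhile p := by
  have h := List.takeWhile_append_dropWhile (p := p) (l := l)
  calc l.drop (l.takeWhile p).length
      = (l.takeWhile p ++ l.dropWhile p).drop (l.takeWhile p).length := by rw [h]
    _ = l.dropWhile p := List.drop_left

-- one unfolding of runsOf on a cons, phrased over the original characters
theorem runsOf_split (c : Char) (rest : List Char) (i : Int) :
    runsOf ((c :: rest).map ctypeB) i =
      (if ctypeB c ≠ 0 then
        [(ctypeB c, i, i + 1 + ((rest.takeWhile fun x => classifyA x == classifyA c).length : Int))]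
      else []) ++
      runsOf ((rest.dropWhile fun x => classifyA x == classifyA c).map ctypeB)
        (i + 1 + ((rest.takeWhile fun x => classifyA x == classifyA c).length : Int)) := by
  have h1 : (List.map ctypeB rest).takeWhile (fun x => x == ctypeB c) =
      (rest.takeWhile fun x => classifyA x == classifyA c).map ctypeB := by
    rw [List.takeWhile_map, ctypeB_pred]
  have h2 : (List.map ctypeB rest).drop
        ((rest.takeWhile fun x => classifyA x == classifyA c).length) =
      (rest.dropWhile fun x => classifyA x == classifyA c).map ctypeB := by
    rw [← List.map_drop, drop_len_takeWhile]
  rw [List.map_cons, runsOf]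
  simp only [h1, List.length_map, h2]
  split_ifs <;> simp

-- the main simulation: A's character state machine against B's run fold, for any suffix cs
-- starting at position i, with the two states related as described by the disjunction
theorem main_sim : ∀ (n : Nat) (cs : List Char), cs.length = n → ∀ (i : Int)
    (resA : List (Int × Int)) (start : Int) (last : CT)
    (stB : List (Int × Int) × Option (Int × Int × Int)),
    ((last = CT.other ∧ resA = stB.1 ++ flushO stB.2 ∧
        (∀ s0 e0 t0, stB.2 = some (s0, e0, t0) → e0 < i)) ∨
     (last ≠ CT.other ∧ stB.2 = some (start, i, ctInt last) ∧ resA = stB.1 ∧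
        (∀ c', cs.head? = some c' → classifyA c' ≠ last))) →
    finishA (i + cs.length) (foldA cs i (resA, start, last)) =
      finishB ((runsOf (cs.map ctypeB) i).foldl stepB stB) := by
  intro n
  induction n using Nat.strong_induction_on with
  | _ n ih =>
  intro cs hlen i resA start last stB hrel
  obtain ⟨resB, o⟩ := stB
  cases cs with
  | nil =>
    simp only [List.map_nil, runsOf, List.foldl_nil, foldA_nil, List.length_nil,
      Int.natCast_zero, add_zero]
    rcases hrel with ⟨hl, hres, -⟩ | ⟨hl, ho, hres, -⟩
    · rw [finishB_eq]
      simp only at hres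
      simp [finishA, hl, hres]
    · simp only at ho hres
      subst hres ho
      simp [finishA, finishB, hl]
  | cons c rest =>
    have hm : (rest.takeWhile fun x => classifyA x == classifyA c) ++
        (rest.dropWhile fun x => classifyA x == classifyA c) = rest :=
      List.takeWhile_append_dropWhile
    have hrunt : ∀ x ∈ (rest.takeWhile fun x => classifyA x == classifyA c),
        classifyA x = classifyA c := by
      intro x hx
      have := List.mem_takeWhile_imp hx
      simpa using this
    have hheadr2 : ∀ a, (rest.dropWhile fun x => classifyA x == classifyA c).head? = some a →
        classifyA a ≠ classifyA c := by
      intro a ha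
      have h1 := List.head?_dropWhile_not (fun x => classifyA x == classifyA c) rest
      rw [ha] at h1
      simpa using h1
    have hlt2 : (rest.dropWhile fun x => classifyA x == classifyA c).length < n := by
      have := congrArg List.length hm
      simp only [List.length_append] at this
      simp only [List.length_cons] at hlen
      omega
    have hfold : ∀ st : List (Int × Int) × Int × CT,
        foldA (c :: rest) i st =
          foldA (rest.dropWhile fun x => classifyA x == classifyA c)
            (i + 1 + ((rest.takeWhile fun x => classifyA x == classifyA c).length : Int))
            (foldA (rest.takeWhile fun x => classifyA x == classifyA c) (i + 1) (stepA st (i, c))) := by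
      intro st
      conv_lhs => rw [← hm]
      rw [foldA_cons, foldA_append]
    have hlen2 : i + ((c :: rest).length : Int) =
        (i + 1 + ((rest.takeWhile fun x => classifyA x == classifyA c).length : Int)) +
          ((rest.dropWhile fun x => classifyA x == classifyA c).length : Int) := by
      have := congrArg List.length hm
      simp only [List.length_append] at this
      simp only [List.length_cons]
      push_cast
      omega
    rw [hlen2, hfold, runsOf_split, List.foldl_append]
    by_cases hc0 : classifyA c = CT.other
    · -- the head character is OTHER: no run is emitted, A appends/flushes as needed
      have hB0 : ¬ ctypeB c ≠ 0 := by simp [ctypeB_eq, hc0, ctInt]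
      rw [if_neg hB0, List.foldl_nil]
      rcases hrel with ⟨hl, hres, hltE⟩ | ⟨hl, ho, hres, hhead⟩
      · subst hl
        have hstep : stepA (resA, start, CT.other) (i, c) = (resA, start, CT.other) := by
          simp [stepA, hc0]
        rw [hstep, foldA_skip (rest.takeWhile fun x => classifyA x == classifyA c) (i + 1) resA start CT.other
          (by intro x hx; rw [hrunt x hx, hc0])]
        apply ih _ hlt2 _ rfl
        refine Or.inl ⟨rfl, hres, ?_⟩
        intro s0 e0 t0 hsome
        have := hltE s0 e0 t0 hsome
        have hk : (0:Int) ≤ ((rest.takeWhile fun x => classifyA x == classifyA c).length : Int) :=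
          Int.natCast_nonneg _
        omega
      · simp only at ho hres
        have hstep : stepA (resA, start, last) (i, c) = (resA ++ [(start, i)], i, CT.other) := by
          simp only [stepA, hc0]
          rw [if_neg (by simp [hl]), if_pos]
          constructor
          · exact hl
          · rintro ⟨-, h2⟩
            cases h2
        rw [hstep, foldA_skip (rest.takeWhile fun x => classifyA x == classifyA c) (i + 1) (resA ++ [(start, i)]) i CT.other
          (by intro x hx; rw [hrunt x hx, hc0])]
        apply ih _ hlt2 _ rfl
        refine Or.inl ⟨rfl, ?_, ?_⟩
        · rw [hres, ho]
          simp [flushO]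
        · intro s0 e0 t0 hsome
          rw [ho] at hsome
          cases hsome
          have hk : (0:Int) ≤ ((rest.takeWhile fun x => classifyA x == classifyA c).length : Int) :=
            Int.natCast_nonneg _
          omega
    · -- the head character starts a non-OTHER run
      have hB0 : ctypeB c ≠ 0 := by
        rw [ctypeB_eq]
        intro h
        exact hc0 ((ctInt_eq_iff _ CT.other).mp h)
      rw [if_pos hB0, List.foldl_cons, List.foldl_nil]
      rcases hrel with ⟨hl, hres, hltE⟩ | ⟨hl, ho, hres, hhead⟩
      · -- A: fresh fragment starts; B: flush any pending open fragment (never adjacent) and open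
        subst hl
        have hstep : stepA (resA, start, CT.other) (i, c) = (resA, i, classifyA c) := by
          simp only [stepA]
          rw [if_pos ⟨trivial, hc0⟩]
        rw [hstep, foldA_skip (rest.takeWhile fun x => classifyA x == classifyA c) (i + 1) resA i (classifyA c) hrunt]
        have hB : stepB (resB, o) (ctypeB c, i,
            i + 1 + ((rest.takeWhile fun x => classifyA x == classifyA c).length : Int)) =
            (resB ++ flushO o, some (i,
              i + 1 + ((rest.takeWhile fun x => classifyA x == classifyA c).length : Int),
              ctypeB c)) := by
          cases o with
          | none => simp [stepB, flushO]
          | some v =>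
            obtain ⟨s0, e0, t0⟩ := v
            have he : e0 < i := hltE s0 e0 t0 rfl
            simp only [stepB]
            rw [if_neg]
            · simp [flushO]
            · rintro ⟨-, -, h3⟩
              omega
        rw [hB]
        apply ih _ hlt2 _ rfl
        refine Or.inr ⟨hc0, by simp [ctypeB_eq], by simpa using hres, ?_⟩
        intro c' hc'
        exact hheadr2 c' hc'
      · -- A is mid-fragment at the boundary; merge exactly when UPPER→lower and adjacent
        simp only at ho hres
        subst ho hres
        have hne : classifyA c ≠ last := hhead c rfl
        by_cases hUL : last = CT.upper ∧ classifyA c = CT.lower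
        · -- merge case
          have hstep : stepA (resA, start, last) (i, c) = (resA, start, classifyA c) := by
            simp only [stepA]
            rw [if_neg (by simp [hl]), if_neg]
            rintro ⟨-, h2⟩
            exact h2 hUL
          rw [hstep, foldA_skip (rest.takeWhile fun x => classifyA x == classifyA c) (i + 1) resA start (classifyA c) hrunt]
          have hB : stepB (resA, some (start, i, ctInt last)) (ctypeB c, i,
              i + 1 + ((rest.takeWhile fun x => classifyA x == classifyA c).length : Int)) =
              (resA, some (start,
                i + 1 + ((rest.takeWhile fun x => classifyA x == classifyA c).length : Int),
                ctypeB c)) := by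
            simp only [stepB]
            rw [if_pos]
            exact ⟨by rw [hUL.1]; rfl, by rw [ctypeB_eq, hUL.2]; rfl, trivial⟩
          rw [hB]
          apply ih _ hlt2 _ rfl
          refine Or.inr ⟨by rw [hUL.2]; simp, by simp [ctypeB_eq], rfl, ?_⟩
          intro c' hc'
          exact hheadr2 c' hc'
        · -- flush case
          have hstep : stepA (resA, start, last) (i, c) =
              (resA ++ [(start, i)], i, classifyA c) := by
            simp only [stepA]
            rw [if_neg (by simp [hl]), if_pos ⟨fun h => hne h.symm, fun h => hUL ⟨h.1, h.2⟩⟩]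
          rw [hstep, foldA_skip (rest.takeWhile fun x => classifyA x == classifyA c) (i + 1) (resA ++ [(start, i)]) i (classifyA c) hrunt]
          have hB : stepB (resA, some (start, i, ctInt last)) (ctypeB c, i,
              i + 1 + ((rest.takeWhile fun x => classifyA x == classifyA c).length : Int)) =
              (resA ++ [(start, i)], some (i,
                i + 1 + ((rest.takeWhile fun x => classifyA x == classifyA c).length : Int),
                ctypeB c)) := by
            simp only [stepB]
            rw [if_neg]
            rintro ⟨h1, h2, -⟩
            rw [ctypeB_eq] at h2
            have hu : last = CT.upper := by
              have : ctInt last = ctInt CT.upper := by rw [h1]; rfl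
              exact (ctInt_eq_iff _ _).mp this
            have hlo : classifyA c = CT.lower := by
              have : ctInt (classifyA c) = ctInt CT.lower := by rw [h2]; rfl
              exact (ctInt_eq_iff _ _).mp this
            exact hUL ⟨hu, hlo⟩
          rw [hB]
          apply ih _ hlt2 _ rfl
          refine Or.inr ⟨hc0, by simp [ctypeB_eq], rfl, ?_⟩
          intro c' hc'
          exact hheadr2 c' hc'

theorem get_fragment_ranges_eq (token : String) :
    get_fragment_ranges token = get_fragment_ranges_alt token := by
  have h := main_sim token.toList.length token.toList rfl 0 [] 0 CT.other ([], none)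
    (Or.inl ⟨rfl, by simp [flushO], by simp⟩)
  simpa [foldA, finishA, finishB, get_fragment_ranges, get_fragment_ranges_alt] using h

-- ===== VERDICT (by name: the statement is the Claim_ definition above) =====
theorem get_fragment_ranges_spec : Claim_equal_get_fragment_ranges := by
  intro token _
  unfold Spec_get_fragment_ranges
  exact get_fragment_ranges_eq token
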